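-- pv_equiv track=rewrite | github.com/wslu42/JTWPA_Design | jtwpa_design/cells/wafers/four_inches_wafer.py | generate_spiral_chips_id
-- ===== SOURCE A (Python) =====
-- def generate_spiral_chips_id(number: int = 49) -> list[list[str]]:
--     id_list = []
--     for i in range(1, number + 1):
--         if i < 10:
--             id_list.append(f"C0{i}")
--         else:
--             id_list.append(f"C{i}")
--     split_list = [id_list[i : i + 7] for i in range(0, len(id_list), 7)]
--     return split_list
-- ===== SOURCE B (Python) =====
-- def generate_spiral_chips_id(number: int = 49) -> list[list[str]]:
--     rows = []
--     cur = []
--     for i in range(1, number + 1):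
--         cur.append(f"C0{i}" if i < 10 else f"C{i}")
--         if len(cur) == 7:
--             rows.append(cur)
--             cur = []
--     if cur:
--         rows.append(cur)
--     return rows
-- ===== Notes on version B (the rewrite author's own statement) =====
-- stated objective: alternative
-- what changed: B builds the rows in a single pass with a current-row accumulator flushed whenever it fills a row, instead of A's two phases (build a flat id list, then slice it by a stepped-range comprehension).
import Mathlib
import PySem

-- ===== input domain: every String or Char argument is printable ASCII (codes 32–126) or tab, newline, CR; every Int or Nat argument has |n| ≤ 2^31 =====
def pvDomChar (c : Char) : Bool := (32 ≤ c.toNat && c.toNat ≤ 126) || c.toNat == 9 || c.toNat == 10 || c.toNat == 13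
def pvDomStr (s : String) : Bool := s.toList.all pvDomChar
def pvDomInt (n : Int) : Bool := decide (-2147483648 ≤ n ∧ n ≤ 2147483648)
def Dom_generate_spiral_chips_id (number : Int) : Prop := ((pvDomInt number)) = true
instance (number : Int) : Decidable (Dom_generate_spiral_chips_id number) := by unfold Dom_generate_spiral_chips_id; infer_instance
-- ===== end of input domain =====

-- B builds the rows in one pass with a current-row accumulator flushed whenever it fills a row,
-- instead of A's flat id list sliced afterwards by a stepped-range comprehension (alternative decomposition).


-- ===== PORT A =====
def generate_spiral_chips_id (number : Int) : List (List String) :=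
  let id_list := (PySem.List.pyRange 1 (number + 1) 1).foldl
    (fun acc i =>
      acc ++ [if i < 10 then "C0" ++ PySem.Int.toStr i else "C" ++ PySem.Int.toStr i]) []
  (PySem.List.pyRange 0 (id_list.length : Int) 7).map
    (fun i => PySem.List.slice id_list (some i) (some (i + 7)))

-- ===== PORT B =====
def generate_spiral_chips_id_alt (number : Int) : List (List String) :=
  let st := (PySem.List.pyRange 1 (number + 1) 1).foldl
    (fun st i =>
      let cur' := st.2 ++ [if i < 10 then "C0" ++ PySem.Int.toStr i else "C" ++ PySem.Int.toStr i]
      if cur'.length = 7 then (st.1 ++ [cur'], []) else (st.1, cur'))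
    ([], [])
  if st.2 ≠ [] then st.1 ++ [st.2] else st.1

-- ===== PRECONDITION & SPEC =====
def Spec_generate_spiral_chips_id (number : Int) (out : List (List String)) : Prop := out = generate_spiral_chips_id_alt number
instance (number : Int) (out : List (List String)) : Decidable (Spec_generate_spiral_chips_id number out) := by unfold Spec_generate_spiral_chips_id; infer_instance

-- ===== CLAIM (what is proved, stated in full; the proofs are below) =====
def Claim_equal_generate_spiral_chips_id : Prop := ∀ (number : Int), Dom_generate_spiral_chips_id number → Spec_generate_spiral_chips_id number (generate_spiral_chips_id number)

-- ===== LEMMAS AND PROOFS =====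

/-- Rows of 7: the common mathematical shape both ports compute. -/
def chunk7 {α : Type} : List α → List (List α)
  | [] => []
  | x :: xs => ((x :: xs).take 7) :: chunk7 ((x :: xs).drop 7)
termination_by xs => xs.length
decreasing_by simp

theorem chunk7_nil {α : Type} : chunk7 ([] : List α) = [] := by
  unfold chunk7; rfl

theorem chunk7_cons {α : Type} (x : α) (t : List α) :
    chunk7 (x :: t) = ((x :: t).take 7) :: chunk7 ((x :: t).drop 7) := by
  conv_lhs => unfold chunk7

theorem chunk7_short {α : Type} (xs : List α) (h : xs.length < 7) :
    chunk7 xs = if xs = [] then [] else [xs] := by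
  cases xs with
  | nil => simp [chunk7_nil]
  | cons x t =>
    rw [chunk7_cons]
    have h1 : (x :: t).take 7 = x :: t := List.take_of_length_le (by omega)
    have h2 : (x :: t).drop 7 = [] := List.drop_of_length_le (Nat.le_of_lt h)
    simp [h1, h2, chunk7_nil]

theorem chunk7_full {α : Type} (c ys : List α) (h : c.length = 7) :
    chunk7 (c ++ ys) = c :: chunk7 ys := by
  cases c with
  | nil => simp at h
  | cons x t =>
    rw [List.cons_append, chunk7_cons, ← List.cons_append]
    rw [List.take_left' h, List.drop_left' h]

/-- B's fold with a partial current row computes `chunk7` of everything seen. -/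
theorem foldB_chunk7 {α : Type} (fmt : Int → α) :
    ∀ (l : List Int) (rows : List (List α)) (cur : List α), cur.length < 7 →
    (if (l.foldl
          (fun st i =>
            if (st.2 ++ [fmt i]).length = 7 then (st.1 ++ [st.2 ++ [fmt i]], []) else (st.1, st.2 ++ [fmt i]))
          (rows, cur)).2 ≠ []
     then (l.foldl
          (fun st i =>
            if (st.2 ++ [fmt i]).length = 7 then (st.1 ++ [st.2 ++ [fmt i]], []) else (st.1, st.2 ++ [fmt i]))
          (rows, cur)).1 ++ [(l.foldl
          (fun st i =>
            if (st.2 ++ [fmt i]).length = 7 then (st.1 ++ [st.2 ++ [fmt i]], []) else (st.1, st.2 ++ [fmt i]))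
          (rows, cur)).2]
     else (l.foldl
          (fun st i =>
            if (st.2 ++ [fmt i]).length = 7 then (st.1 ++ [st.2 ++ [fmt i]], []) else (st.1, st.2 ++ [fmt i]))
          (rows, cur)).1)
    = rows ++ chunk7 (cur ++ l.map fmt) := by
  intro l
  induction l with
  | nil =>
    intro rows cur h
    simp only [List.foldl_nil, List.map_nil, List.append_nil]
    rw [chunk7_short cur h]
    by_cases hc : cur = [] <;> simp [hc]
  | cons i l ih =>
    intro rows cur h
    simp only [List.foldl_cons, List.map_cons]
    by_cases h7 : (cur ++ [fmt i]).length = 7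
    · simp only [if_pos h7]
      rw [ih (rows ++ [cur ++ [fmt i]]) [] (by simp)]
      rw [show cur ++ fmt i :: l.map fmt = (cur ++ [fmt i]) ++ l.map fmt by simp]
      rw [chunk7_full _ _ h7]
      simp
    · simp only [if_neg h7]
      rw [ih rows (cur ++ [fmt i]) (by simp at h7 ⊢; omega)]
      simp

/-- A's stepped-range slicing computes `chunk7`. -/
theorem sliceA_chunk7 {α : Type} (xs : List α) :
    (PySem.List.pyRange 0 (xs.length : Int) 7).map
      (fun i => PySem.List.slice xs (some i) (some (i + 7))) = chunk7 xs := by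
  generalize hn : xs.length = n
  induction n using Nat.strong_induction_on generalizing xs with
  | _ n ih =>
    cases xs with
    | nil =>
      simp at hn; subst hn
      rw [PySem.List.pyRange_of_pos 0 ((0:Nat):Int) (s := 7) (by norm_num), chunk7_nil]
      simp
    | cons x t =>
      subst hn
      rw [chunk7_cons]
      have hpos : (0 : Int) < ((x :: t).length : Int) := by simp
      rw [PySem.List.pyRange_of_pos 0 ((x :: t).length : Int) (s := 7) (by norm_num)]
      rw [if_pos hpos]
      have hcnt : ((((x :: t).length : Int) - 0 + 7 - 1) / 7).toNat = ((x :: t).length + 6) / 7 := by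
        have : (((x :: t).length : Int) - 0 + 7 - 1) = (((x :: t).length + 6 : Nat) : Int) := by push_cast; ring
        rw [this]; omega
      rw [hcnt]
      have hq : ((x :: t).length + 6) / 7 = (((x :: t).drop 7).length + 6) / 7 + 1 := by
        simp only [List.length_drop, List.length_cons]; omega
      rw [hq, List.range_succ_eq_map]
      simp only [List.map_cons, List.map_map]
      congr 1
      · -- head element: xs[0 : 0+7] = take 7 xs
        show PySem.List.slice (x :: t) (some (0 + 7 * ((0 : Nat) : Int))) (some (0 + 7 * ((0 : Nat) : Int) + 7)) = _
        have := PySem.List.slice_natCast_add (x :: t) 0 7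
        simpa using this
      · -- tail: shift by 7 and recurse on the dropped list
        have ihdrop := ih ((x :: t).drop 7).length (by simp only [List.length_drop, List.length_cons]; omega) ((x :: t).drop 7) rfl
        rw [PySem.List.pyRange_of_pos 0 ((((x :: t).drop 7).length : Int)) (s := 7) (by norm_num)] at ihdrop
        by_cases hz : ((x :: t).drop 7) = []
        · have hz' : (((x :: t).drop 7).length + 6) / 7 = 0 := by rw [hz]; simp
          rw [hz']
          simp only [List.range_zero, List.map_nil]
          rw [hz, chunk7_nil]
        · have hpos' : (0 : Int) < (((x :: t).drop 7).length : Int) := by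
            cases hzz : ((x :: t).drop 7) with
            | nil => exact absurd hzz hz
            | cons a b => simp
          rw [if_pos hpos'] at ihdrop
          have hcnt' : (((((x :: t).drop 7).length : Int) - 0 + 7 - 1) / 7).toNat
              = (((x :: t).drop 7).length + 6) / 7 := by
            have : ((((x :: t).drop 7).length : Int) - 0 + 7 - 1)
                = ((((x :: t).drop 7).length + 6 : Nat) : Int) := by push_cast; ring
            rw [this]; omega
          rw [hcnt', List.map_map] at ihdrop
          rw [← ihdrop]
          apply List.map_congr_left
          intro k hk
          simp only [Function.comp_apply, Nat.succ_eq_add_one]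
          have ha1 : (0:Int) ≤ 0 + 7 * ((k + 1 : Nat) : Int) := by omega
          have hb1 : (0:Int) ≤ 0 + 7 * ((k + 1 : Nat) : Int) + 7 := by omega
          have ha2 : (0:Int) ≤ 0 + 7 * ((k : Nat) : Int) := by omega
          have hb2 : (0:Int) ≤ 0 + 7 * ((k : Nat) : Int) + 7 := by omega
          rw [PySem.List.slice_toNat (x :: t) ha1 hb1,
              PySem.List.slice_toNat ((x :: t).drop 7) ha2 hb2,
              List.drop_drop]
          congr 1
          · omega
          · congr 1
            omega

-- ===== VERDICT (by name: the statement is the Claim_ definition above) =====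
theorem generate_spiral_chips_id_spec : Claim_equal_generate_spiral_chips_id := by
  intro number _
  unfold Spec_generate_spiral_chips_id generate_spiral_chips_id generate_spiral_chips_id_alt
  simp only []
  rw [PySem.List.foldl_append_singleton_eq_map]
  rw [sliceA_chunk7]
  rw [foldB_chunk7 (fun i => if i < 10 then "C0" ++ PySem.Int.toStr i else "C" ++ PySem.Int.toStr i)
      (PySem.List.pyRange 1 (number + 1) 1) [] [] (by simp)]
  simp
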